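-- pv_equiv track=rewrite | github.com/eveem/adventofcode2024 | day_09/main.py | list_space
-- ===== SOURCE A (Python) =====
-- import heapq
--
-- def list_space(disk):
--     n = len(disk)
--     curr = 0
--     res = []
--
--     for i in range(n):
--         if disk[i] == ".":
--             curr += 1
--         elif disk[i] != "." and curr != 0:
--             heapq.heappush(res, [i - curr, curr])
--             curr = 0
--
--     return res
-- ===== SOURCE B (Python) =====
-- def list_space(disk):
--     files = [i for i, c in enumerate(disk) if c != "."]
--     res = []
--     prev = -1
--     for f in files:
--         if f - prev > 1:
--             res.append([prev + 1, f - prev - 1])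
--         prev = f
--     return res
-- ===== Notes on version B (the rewrite author's own statement) =====
-- stated objective: simpler
-- what changed: Replaces the dot-run counter with heapq.heappush by first collecting file (non-'.') positions and emitting each gap as the difference between consecutive file positions with a plain list append (pushes arrive in increasing order, so the heap was just a list).
import Mathlib
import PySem

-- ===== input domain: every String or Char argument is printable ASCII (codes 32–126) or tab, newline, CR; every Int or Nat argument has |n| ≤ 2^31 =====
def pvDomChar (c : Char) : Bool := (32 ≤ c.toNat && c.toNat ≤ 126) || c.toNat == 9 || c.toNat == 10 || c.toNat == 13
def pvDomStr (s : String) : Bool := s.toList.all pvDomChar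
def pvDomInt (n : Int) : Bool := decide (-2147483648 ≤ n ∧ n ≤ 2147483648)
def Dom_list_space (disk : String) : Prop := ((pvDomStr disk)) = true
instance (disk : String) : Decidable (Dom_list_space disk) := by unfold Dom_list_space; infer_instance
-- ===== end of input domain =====

-- B replaces A's dot-run counter + heapq.heappush with an index of file positions and
-- consecutive differences appended to a plain list (simpler; pushes were monotone so the heap was a list).


-- ===== PORT A =====
-- Python list comparison '<' on lists of ints (lexicographic), as used by heapq
def pyListLt : List Int → List Int → Bool
  | [], [] => false
  | [], _ :: _ => true
  | _ :: _, [] => false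
  | a :: as_, b :: bs => if a < b then true else if b < a then false else pyListLt as_ bs

-- heapq._siftdown's while loop: bubble newitem up from position pos toward the root
def siftdownLoop (heap : List (List Int)) (pos : Nat) (newitem : List Int) : List (List Int) :=
  if h : 0 < pos then
    if pyListLt newitem (heap.getD ((pos - 1) / 2) []) then
      siftdownLoop (heap.set pos (heap.getD ((pos - 1) / 2) [])) ((pos - 1) / 2) newitem
    else heap.set pos newitem
  else heap.set pos newitem
termination_by pos
decreasing_by omega

-- heapq.heappush: append, then sift up from the last position
def heappush (heap : List (List Int)) (item : List Int) : List (List Int) :=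
  siftdownLoop (heap ++ [item]) heap.length item

-- the for-loop of A: index i, dot counter curr, accumulator res
def loopA : List Char → Nat → Int → List (List Int) → List (List Int)
  | [], _, _, res => res
  | c :: rest, i, curr, res =>
    if c == '.' then loopA rest (i + 1) (curr + 1) res
    else if c != '.' && curr != 0 then loopA rest (i + 1) 0 (heappush res [(i : Int) - curr, curr])
    else loopA rest (i + 1) curr res

def list_space (disk : String) : List (List Int) :=
  loopA disk.toList 0 0 []

-- ===== PORT B =====
-- the comprehension [i for i, c in enumerate(disk) if c != "."]
def filesOf : List Char → Nat → List Int
  | [], _ => []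
  | c :: rest, i => if c != '.' then (i : Int) :: filesOf rest (i + 1) else filesOf rest (i + 1)

-- the for-loop of B: previous file position prev, accumulator res
def loopB : List Int → Int → List (List Int) → List (List Int)
  | [], _, res => res
  | f :: rest, prev, res =>
    loopB rest f (if f - prev > 1 then res ++ [[prev + 1, f - prev - 1]] else res)

def list_space_alt (disk : String) : List (List Int) :=
  loopB (filesOf disk.toList 0) (-1) []

-- ===== PRECONDITION & SPEC =====
def Spec_list_space (disk : String) (out : List (List Int)) : Prop := out = list_space_alt disk
instance (disk : String) (out : List (List Int)) : Decidable (Spec_list_space disk out) := by unfold Spec_list_space; infer_instance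

-- ===== CLAIM (what is proved, stated in full; the proofs are below) =====
def Claim_equal_list_space : Prop := ∀ (disk : String), Dom_list_space disk → Spec_list_space disk (list_space disk)

-- ===== LEMMAS AND PROOFS =====

-- pushes arrive with strictly increasing first components, so the sift-up never moves anything:
-- heappush is an append whenever every element of the heap has a head ≤ some bound below item's head
theorem heappush_eq_append (res : List (List Int)) (p c : Int)
    (hinv : ∀ x ∈ res, ∃ h t, x = h :: t ∧ h < p) :
    heappush res [p, c] = res ++ [[p, c]] := by
  unfold heappush siftdownLoop
  rcases res with _ | ⟨y, ys⟩
  · simp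
  · have hlen : 0 < (y :: ys).length := by simp
    rw [dif_pos hlen]
    have hparent : ((y :: ys).length - 1) / 2 < (y :: ys).length := by
      simp only [List.length_cons]; omega
    have hget : ((y :: ys) ++ [[p, c]]).getD (((y :: ys).length - 1) / 2) [] =
        (y :: ys).getD (((y :: ys).length - 1) / 2) [] := by
      rw [List.getD_eq_getElem?_getD, List.getD_eq_getElem?_getD,
        List.getElem?_append_left hparent]
    have hmem : (y :: ys).getD (((y :: ys).length - 1) / 2) [] ∈ (y :: ys) := by
      rw [List.getD_eq_getElem?_getD, List.getElem?_eq_getElem hparent]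
      simp
    obtain ⟨h, t, hx, hlt⟩ := hinv _ hmem
    have hcmp : pyListLt [p, c] ((y :: ys).getD (((y :: ys).length - 1) / 2) []) = false := by
      rw [hx]; unfold pyListLt
      have : ¬ p < h := by omega
      simp [this, hlt]
    rw [hget, hcmp]
    simp only [Bool.false_eq_true, if_false]
    rw [List.set_append]
    simp

-- main invariant: A's loop with curr = i - prev - 1 equals B's loop over the remaining file positions
theorem loop_eq (l : List Char) : ∀ (i : Nat) (prev : Int) (res : List (List Int)),
    prev + 1 ≤ (i : Int) →
    (∀ x ∈ res, ∃ h t, x = h :: t ∧ h ≤ prev) →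
    loopA l i ((i : Int) - prev - 1) res = loopB (filesOf l i) prev res := by
  induction l with
  | nil => intro i prev res _ _; simp [loopA, filesOf, loopB]
  | cons c rest ih =>
    intro i prev res hle hinv
    by_cases hc : c = '.'
    · have : (i : Int) - prev - 1 + 1 = ((i : Nat) + 1 : Nat) - prev - 1 := by push_cast; ring
      simp only [loopA, filesOf, hc, beq_self_eq_true, if_true, bne_self_eq_false,
        Bool.false_eq_true, if_false, this]
      exact ih (i + 1) prev res (by push_cast; omega) hinv
    · have hbeq : (c == '.') = false := by simp [hc]
      have hbne : (c != '.') = true := by simp [hc]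
      simp only [loopA, filesOf, hbeq, Bool.false_eq_true, if_false, hbne, if_true,
        Bool.true_and, loopB]
      by_cases hz : (i : Int) - prev - 1 = 0
      · -- curr = 0: no push, no gap (f - prev = 1)
        have : ((i : Int) - prev - 1 != 0) = false := by simp [hz]
        simp only [this, Bool.false_eq_true, if_false]
        have hgap : ¬ ((i : Int) - prev > 1) := by omega
        rw [if_neg hgap]
        have hcur : (i : Int) - prev - 1 = ((i : Nat) + 1 : Nat) - (i : Int) - 1 := by
          push_cast; omega
        rw [hcur]
        exact ih (i + 1) i res (by push_cast; omega)
          (fun x hx => by obtain ⟨h, t, hx', hle'⟩ := hinv x hx; exact ⟨h, t, hx', by omega⟩)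
      · -- curr ≠ 0: push = append of the gap
        have : ((i : Int) - prev - 1 != 0) = true := by simp [hz]
        simp only [this, if_true]
        have hgap : (i : Int) - prev > 1 := by omega
        rw [if_pos hgap]
        have hpush : heappush res [(i : Int) - ((i : Int) - prev - 1), (i : Int) - prev - 1]
            = res ++ [[prev + 1, (i : Int) - prev - 1]] := by
          have : (i : Int) - ((i : Int) - prev - 1) = prev + 1 := by ring
          rw [this]
          exact heappush_eq_append res (prev + 1) ((i : Int) - prev - 1)
            (fun x hx => by
              obtain ⟨h, t, hx', hle'⟩ := hinv x hx; exact ⟨h, t, hx', by omega⟩)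
        rw [hpush]
        have hz0 : (0 : Int) = ((i : Nat) + 1 : Nat) - (i : Int) - 1 := by push_cast; ring
        rw [hz0]
        exact ih (i + 1) i (res ++ [[prev + 1, (i : Int) - prev - 1]]) (by push_cast; omega)
          (fun x hx => by
            rcases List.mem_append.mp hx with h1 | h1
            · obtain ⟨h, t, hx', hle'⟩ := hinv x h1; exact ⟨h, t, hx', by omega⟩
            · simp at h1; exact ⟨prev + 1, [(i : Int) - prev - 1], h1, by omega⟩)

-- ===== VERDICT (by name: the statement is the Claim_ definition above) =====
theorem list_space_spec : Claim_equal_list_space := by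
  intro disk _
  show list_space disk = list_space_alt disk
  unfold list_space list_space_alt
  have := loop_eq disk.toList 0 (-1) [] (by norm_num) (by simp)
  simpa using this
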